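-- pv_equiv track=rewrite | github.com/kasumbarobert/data-driven-grd | overcooked-ai/src/overcooked_ai_py/simulations/wcd_simulation_utils.py | find_wcd
-- ===== SOURCE A (Python) =====
-- def find_wcd(paths):
--     max_prefix_length = 0
--     for path1 in paths:
--         for path2 in paths:
--             if path1 == path2: continue
--             prefix_length = -1
--             i = 0
--             while i < len(path1) and i < len(path2) and path1[i] == path2[i]:
--                 prefix_length += 1
--                 i += 1
--             if prefix_length > max_prefix_length:
--                 max_prefix_length = prefix_length
--     return max_prefix_length
-- ===== SOURCE B (Python) =====
-- def find_wcd(paths):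
--     uniq = sorted(set(map(tuple, paths)))
--     best = 0
--     for a, b in zip(uniq, uniq[1:]):
--         l = 0
--         while l < len(a) and l < len(b) and a[l] == b[l]:
--             l += 1
--         if l - 1 > best:
--             best = l - 1
--     return best
-- ===== Notes on version B (the rewrite author's own statement) =====
-- stated objective: faster
-- what changed: B sorts the distinct paths lexicographically and computes the LCP only of adjacent pairs in sorted order, instead of A's nested scan over all ordered pairs.
import Mathlib
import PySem

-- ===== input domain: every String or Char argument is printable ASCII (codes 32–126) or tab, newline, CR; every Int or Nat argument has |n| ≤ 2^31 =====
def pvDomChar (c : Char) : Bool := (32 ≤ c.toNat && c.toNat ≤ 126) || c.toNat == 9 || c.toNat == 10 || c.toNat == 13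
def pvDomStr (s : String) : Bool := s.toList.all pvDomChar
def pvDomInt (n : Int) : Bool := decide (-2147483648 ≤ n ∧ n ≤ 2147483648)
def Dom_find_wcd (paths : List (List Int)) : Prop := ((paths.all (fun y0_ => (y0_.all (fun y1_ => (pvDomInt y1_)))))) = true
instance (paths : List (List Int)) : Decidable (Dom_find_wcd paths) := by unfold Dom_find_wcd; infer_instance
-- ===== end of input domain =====

-- B sorts the distinct paths lexicographically and takes the max LCP over adjacent pairs only,
-- instead of A's scan over all ordered pairs; the return values are proved identical on all inputs.

-- ===== PORT A =====
-- the 'while i < len... and path1[i] == path2[i]: prefix_length += 1' loop, step for step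
def pvWhile : List Int → List Int → Int → Int
  | a :: as, b :: bs, pl => if a = b then pvWhile as bs (pl + 1) else pl
  | _, _, pl => pl

def find_wcd (paths : List (List Int)) : Int :=
  paths.foldl (fun m path1 =>
    paths.foldl (fun m path2 =>
      if path1 = path2 then m
      else
        let pl := pvWhile path1 path2 (-1)
        if pl > m then pl else m) m) 0

-- ===== PORT B =====
-- Python tuple comparison (lexicographic), as a Bool relation for sorting
def pvLexLe : List Int → List Int → Bool
  | [], _ => true
  | _ :: _, [] => false
  | a :: as, b :: bs => if a < b then true else if b < a then false else pvLexLe as bs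

-- the inner 'while l < len(a) and l < len(b) and a[l] == b[l]: l += 1' of B
def pvLcp : List Int → List Int → Nat
  | a :: as, b :: bs => if a = b then pvLcp as bs + 1 else 0
  | _, _ => 0

def find_wcd_alt (paths : List (List Int)) : Int :=
  let uniq := (paths.dedup).mergeSort pvLexLe   -- sorted(set(...))
  (uniq.zip uniq.tail).foldl (fun best ab =>
    let l := pvLcp ab.1 ab.2
    if (l : Int) - 1 > best then (l : Int) - 1 else best) 0

-- ===== PRECONDITION & SPEC =====
def Spec_find_wcd (paths : List (List Int)) (out : Int) : Prop := out = find_wcd_alt paths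
instance (paths : List (List Int)) (out : Int) : Decidable (Spec_find_wcd paths out) := by unfold Spec_find_wcd; infer_instance

-- ===== CLAIM (what is proved, stated in full; the proofs are below) =====
def Claim_equal_find_wcd : Prop := ∀ (paths : List (List Int)), Dom_find_wcd paths → Spec_find_wcd paths (find_wcd paths)

-- ===== LEMMAS AND PROOFS =====

theorem pvWhile_eq (x y : List Int) (c : Int) : pvWhile x y c = c + pvLcp x y := by
  induction x generalizing y c with
  | nil => cases y <;> simp [pvWhile, pvLcp]
  | cons a as ih =>
    cases y with
    | nil => simp [pvWhile, pvLcp]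
    | cons b bs =>
      by_cases h : a = b
      · simp [pvWhile, pvLcp, h, ih]; ring
      · simp [pvWhile, pvLcp, h]

theorem pvLcp_comm (x y : List Int) : pvLcp x y = pvLcp y x := by
  induction x generalizing y with
  | nil => cases y <;> simp [pvLcp]
  | cons a as ih =>
    cases y with
    | nil => simp [pvLcp]
    | cons b bs =>
      by_cases h : a = b
      · simp [pvLcp, h, ih]
      · have h' : ¬ b = a := fun h' => h h'.symm
        simp [pvLcp, h, h']

theorem pvLexLe_total (x y : List Int) : (pvLexLe x y || pvLexLe y x) = true := by
  induction x generalizing y with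
  | nil => simp [pvLexLe]
  | cons a as ih =>
    cases y with
    | nil => simp [pvLexLe]
    | cons b bs =>
      simp only [pvLexLe]
      rcases lt_trichotomy a b with h | h | h <;>
        simp [h, not_lt_of_gt, ih]

theorem pvLexLe_trans (x y z : List Int) (h1 : pvLexLe x y = true) (h2 : pvLexLe y z = true) :
    pvLexLe x z = true := by
  induction x generalizing y z with
  | nil => cases z <;> simp [pvLexLe]
  | cons a as ih =>
    cases y with
    | nil => simp [pvLexLe] at h1
    | cons b bs =>
      cases z with
      | nil => simp [pvLexLe] at h2
      | cons c cs =>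
        simp only [pvLexLe] at h1 h2 ⊢
        by_cases hab : a < b
        · by_cases hbc : b < c
          · simp [lt_trans hab hbc]
          · by_cases hcb : c < b
            · simp [hbc, hcb] at h2
            · have hbc' : b = c := le_antisymm (not_lt.1 hcb) (not_lt.1 hbc)
              subst hbc'
              simp [hab]
        · by_cases hba : b < a
          · simp [hab, hba] at h1
          · have hab' : a = b := le_antisymm (not_lt.1 hba) (not_lt.1 hab)
            subst hab'
            simp at h1
            by_cases hac : a < c
            · simp [hac]
            · by_cases hca : c < a
              · simp [hac, hca] at h2
              · have : a = c := le_antisymm (not_lt.1 hca) (not_lt.1 hac)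
                subst this
                simp only [lt_irrefl, if_false] at h2 ⊢
                exact ih bs cs h1 h2

-- if x ≤ y ≤ z then the common prefix of x and z is a prefix of y too
theorem pvLcp_le_between (x y z : List Int) (h1 : pvLexLe x y = true) (h2 : pvLexLe y z = true) :
    pvLcp x z ≤ pvLcp x y := by
  induction x generalizing y z with
  | nil => simp [pvLcp]
  | cons a as ih =>
    cases z with
    | nil => cases y <;> simp [pvLcp]
    | cons c cs =>
      by_cases hac : a = c
      · cases y with
        | nil => simp [pvLexLe] at h1
        | cons b bs =>
          simp only [pvLexLe] at h1 h2
          subst hac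
          by_cases hab : a < b
          · have : ¬ b < a := not_lt_of_gt hab
            simp [hab, this] at h2
          · by_cases hba : b < a
            · simp [hab, hba] at h1
            · have : a = b := le_antisymm (not_lt.1 hba) (not_lt.1 hab)
              subst this
              simp only [lt_irrefl, if_false] at h1 h2
              simp only [pvLcp]
              exact Nat.succ_le_succ (ih bs cs h1 h2)
      · simp [pvLcp, hac]

-- ---- generic bounds for the max-folds ----

def pvFm (h : α → Option Int) (b : Int) (l : List α) : Int :=
  l.foldl (fun m x => match h x with
    | none => m
    | some v => if v > m then v else m) b

theorem pvFm_ge_init {α : Type} (h : α → Option Int) (b : Int) (l : List α) :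
    b ≤ pvFm h b l := by
  induction l generalizing b with
  | nil => simp [pvFm]
  | cons x xs ih =>
    simp only [pvFm, List.foldl] at *
    cases hx : h x <;> simp
    · exact ih b
    · rename_i v
      calc b ≤ (if v > b then v else b) := by split_ifs <;> omega
        _ ≤ _ := ih _

theorem pvFm_ge_mem {α : Type} (h : α → Option Int) (b : Int) (l : List α) (x : α) (v : Int)
    (hx : x ∈ l) (hv : h x = some v) : v ≤ pvFm h b l := by
  induction l generalizing b with
  | nil => simp at hx
  | cons y ys ih =>
    simp only [pvFm, List.foldl]
    rcases List.mem_cons.1 hx with rfl | hmem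
    · rw [hv]
      calc v ≤ (if v > b then v else b) := by split_ifs <;> omega
        _ ≤ _ := pvFm_ge_init h _ ys
    · cases hy : h y <;> simp
      · exact ih _ hmem
      · exact ih _ hmem

theorem pvFm_le {α : Type} (h : α → Option Int) (b c : Int) (l : List α)
    (hb : b ≤ c) (hl : ∀ x ∈ l, ∀ v, h x = some v → v ≤ c) : pvFm h b l ≤ c := by
  induction l generalizing b with
  | nil => simpa [pvFm]
  | cons x xs ih =>
    simp only [pvFm, List.foldl]
    cases hx : h x <;> simp
    · exact ih b hb (fun y hy => hl y (List.mem_cons_of_mem _ hy))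
    · rename_i v
      apply ih _ _ (fun y hy => hl y (List.mem_cons_of_mem _ hy))
      have := hl x (List.mem_cons_self) v hx
      split_ifs <;> omega

-- ---- A's nested fold through pvFm ----

def pvHA (p1 p2 : List Int) : Option Int :=
  if p1 = p2 then none else some ((pvLcp p1 p2 : Int) - 1)

theorem find_wcd_eq_fm (paths : List (List Int)) :
    find_wcd paths = paths.foldl (fun m p1 => pvFm (pvHA p1) m paths) 0 := by
  unfold find_wcd
  congr 1
  funext m p1
  unfold pvFm
  congr 1
  funext m' p2
  by_cases h : p1 = p2
  · simp [pvHA, h]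
  · simp only [pvHA, h, if_false, pvWhile_eq]
    split_ifs <;> omega

theorem outer_ge_init (paths l : List (List Int)) (b : Int) :
    b ≤ l.foldl (fun m p1 => pvFm (pvHA p1) m paths) b := by
  induction l generalizing b with
  | nil => simp
  | cons x xs ih =>
    simp only [List.foldl]
    calc b ≤ pvFm (pvHA x) b paths := pvFm_ge_init _ _ _
      _ ≤ _ := ih _

theorem outer_ge_pair (paths l : List (List Int)) (b : Int) (p1 p2 : List Int) (v : Int)
    (h1 : p1 ∈ l) (h2 : p2 ∈ paths) (hv : pvHA p1 p2 = some v) :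
    v ≤ l.foldl (fun m p1 => pvFm (pvHA p1) m paths) b := by
  induction l generalizing b with
  | nil => simp at h1
  | cons x xs ih =>
    simp only [List.foldl]
    rcases List.mem_cons.1 h1 with rfl | hmem
    · calc v ≤ pvFm (pvHA p1) b paths := pvFm_ge_mem _ _ _ _ _ h2 hv
        _ ≤ _ := outer_ge_init _ _ _
    · exact ih _ hmem

theorem outer_le (paths l : List (List Int)) (b c : Int) (hb : b ≤ c)
    (hl : ∀ p1 ∈ l, ∀ p2 ∈ paths, ∀ v, pvHA p1 p2 = some v → v ≤ c) :
    l.foldl (fun m p1 => pvFm (pvHA p1) m paths) b ≤ c := by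
  induction l generalizing b with
  | nil => simpa
  | cons x xs ih =>
    simp only [List.foldl]
    exact ih _ (pvFm_le _ _ _ _ hb (fun p2 h2 => hl x List.mem_cons_self p2 h2))
      (fun p1 h1 => hl p1 (List.mem_cons_of_mem _ h1))

-- ---- B's fold through pvFm ----

def pvHB (ab : List Int × List Int) : Option Int := some ((pvLcp ab.1 ab.2 : Int) - 1)

theorem find_wcd_alt_eq_fm (paths : List (List Int)) :
    find_wcd_alt paths =
      (let uniq := (paths.dedup).mergeSort pvLexLe
       pvFm pvHB 0 (uniq.zip uniq.tail)) := by
  rfl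

-- adjacent pairs of a list, as members of zip l l.tail, are ⟨l₁ ++ u :: v :: l₂⟩ decompositions
theorem mem_zip_tail_decomp {α : Type} (l : List α) (u v : α)
    (h : (u, v) ∈ l.zip l.tail) : ∃ l1 l2, l = l1 ++ u :: v :: l2 := by
  induction l with
  | nil => simp at h
  | cons x xs ih =>
    cases xs with
    | nil => simp at h
    | cons y ys =>
      simp only [List.tail_cons, List.zip_cons_cons, List.mem_cons] at h
      rcases h with h | h
      · obtain ⟨rfl, rfl⟩ := Prod.mk.inj h
        exact ⟨[], ys, rfl⟩
      · obtain ⟨l1, l2, hl⟩ := ih h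
        exact ⟨x :: l1, l2, by simp [hl]⟩

-- a pair of distinct members of a sorted list has LCP ≤ the LCP of some adjacent pair
theorem lcp_le_adj (l : List (List Int)) (hs : List.Pairwise (fun a b => pvLexLe a b = true) l)
    (a b : List Int) (ha : a ∈ l) (hb : b ∈ l) (hab : a ≠ b) :
    ∃ u v, (u, v) ∈ l.zip l.tail ∧ pvLcp a b ≤ pvLcp u v := by
  induction l with
  | nil => simp at ha
  | cons x xs ih =>
    have hpx : ∀ y ∈ xs, pvLexLe x y = true := (List.pairwise_cons.1 hs).1
    have hsx : List.Pairwise (fun a b => pvLexLe a b = true) xs := (List.pairwise_cons.1 hs).2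
    rcases List.mem_cons.1 ha with rfl | ha' <;> rcases List.mem_cons.1 hb with rfl | hb'
    · exact absurd rfl hab
    · -- a = x, b ∈ xs
      cases xs with
      | nil => simp at hb'
      | cons y ys =>
        refine ⟨a, y, by simp, ?_⟩
        rcases List.mem_cons.1 hb' with rfl | hb'' 
        · exact le_refl _
        · exact pvLcp_le_between a y b (hpx y List.mem_cons_self)
            ((List.pairwise_cons.1 hsx).1 b hb'')
    · -- b = x, a ∈ xs
      cases xs with
      | nil => simp at ha'
      | cons y ys =>
        refine ⟨b, y, by simp, ?_⟩
        rw [pvLcp_comm]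
        rcases List.mem_cons.1 ha' with rfl | ha''
        · exact le_refl _
        · exact pvLcp_le_between b y a (hpx y List.mem_cons_self)
            ((List.pairwise_cons.1 hsx).1 a ha'')
    · obtain ⟨u, v, huv, hle⟩ := ih hsx ha' hb'
      refine ⟨u, v, ?_, hle⟩
      cases xs with
      | nil => simp at huv
      | cons y ys => simp only [List.tail_cons, List.zip_cons_cons, List.mem_cons]; right; exact huv

-- ===== VERDICT (by name: the statement is the Claim_ definition above) =====
theorem find_wcd_spec : Claim_equal_find_wcd := by
  intro paths _
  unfold Spec_find_wcd
  rw [find_wcd_eq_fm, find_wcd_alt_eq_fm]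
  simp only []
  set uniq := (paths.dedup).mergeSort pvLexLe with huniq
  have hperm : uniq.Perm paths.dedup := List.mergeSort_perm _ _
  have hmemu : ∀ x, x ∈ uniq ↔ x ∈ paths := by
    intro x
    rw [hperm.mem_iff, List.mem_dedup]
  have hnodup : uniq.Nodup := hperm.symm.nodup (List.nodup_dedup paths)
  have hsorted : List.Pairwise (fun a b => pvLexLe a b = true) uniq :=
    List.pairwise_mergeSort pvLexLe_trans pvLexLe_total _
  apply le_antisymm
  · -- A ≤ B
    apply outer_le _ _ _ _ (pvFm_ge_init _ _ _)
    intro p1 h1 p2 h2 v hv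
    unfold pvHA at hv
    by_cases hne : p1 = p2
    · simp [hne] at hv
    · simp only [hne, if_false, Option.some.injEq] at hv
      obtain ⟨u, w, huw, hle⟩ := lcp_le_adj uniq hsorted p1 p2 ((hmemu p1).2 h1) ((hmemu p2).2 h2) hne
      have := pvFm_ge_mem pvHB 0 (uniq.zip uniq.tail) (u, w) ((pvLcp u w : Int) - 1) huw rfl
      have hcast : ((pvLcp p1 p2 : Int)) ≤ (pvLcp u w : Int) := by exact_mod_cast hle
      omega
  · -- B ≤ A
    apply pvFm_le _ _ _ _ (outer_ge_init _ _ _)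
    rintro ⟨u, v⟩ huv w hw
    unfold pvHB at hw
    simp only [Option.some.injEq] at hw
    obtain ⟨l1, l2, hdec⟩ := mem_zip_tail_decomp uniq u v huv
    have hu : u ∈ uniq := by rw [hdec]; simp
    have hv' : v ∈ uniq := by rw [hdec]; simp
    have hne : u ≠ v := by
      have : (u :: v :: l2).Nodup := List.Nodup.of_append_right (hdec ▸ hnodup)
      intro h; subst h
      exact (List.nodup_cons.1 this).1 List.mem_cons_self
    have : pvHA u v = some ((pvLcp u v : Int) - 1) := by simp [pvHA, hne]
    have := outer_ge_pair paths paths 0 u v _ ((hmemu u).1 hu) ((hmemu v).1 hv') this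
    omega
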